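-- pv_equiv track=rewrite | github.com/JakubMlocek/Algorithms_and_Data_Structures | kolokwiaIegzaminy/egz2/zad1.py | intuse
-- ===== SOURCE A (Python) =====
-- def DFS(G, s, e, intervals):
--     visited = [False] * len(G)
--     parent = [-1] * len(G)
--     def DFSvisit(G, u):
--         visited[u] = True
--         for each in G[u]:
--             if not visited[each]:
--                 parent[each] = u
--                 DFSvisit(G, each)
--
--     DFSvisit(G, s)
--     if visited[e]:
--         while e != -1:
--             if e not in intervals:
--                 intervals.append(e)
--             e = parent[e]
--
-- def intuse( I, x, y ):
--     n = len( I )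
--     G = [[] for _ in range(n)]
--
--     for i in range(n):#tworzymy graf na podstawie zachowanych indeksow
--         for j in range(n):
--             if i != j:
--                 if I[i][1] == I[j][0]:
--                     G[i].append(j)
--
--     starts = []
--     for i in range( n ): #szukamy pod jakimi indeksami sa poczatki szukanego przedzialu
--         if I[i][0] == x:
--             starts.append( i )
--
--     ends = []
--     for i in range( n ): #szukamy pod jakimi indeksami sa poczatki szukanego przedzialu
--         if I[i][1] == y:
--             ends.append( i )
--
--     intervals = []
--     for start in starts:
--         for end in ends:
--             DFS( G, start, end, intervals)
--     return intervals
-- ===== SOURCE B (Python) =====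
-- def _dfs_tree(G, s):
--     visited = [False] * len(G)
--     parent = [-1] * len(G)
--     def go(u):
--         visited[u] = True
--         for v in G[u]:
--             if not visited[v]:
--                 parent[v] = u
--                 go(v)
--     go(s)
--     return visited, parent
--
-- def intuse(I, x, y):
--     n = len(I)
--     by_start = {}
--     for j in range(n):
--         by_start.setdefault(I[j][0], []).append(j)
--     G = [[j for j in by_start.get(I[i][1], []) if j != i] for i in range(n)]
--     starts = [i for i in range(n) if I[i][0] == x]
--     ends = [i for i in range(n) if I[i][1] == y]
--
--     result = []
--     seen = set()
--     for s in starts: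
--         visited, parent = _dfs_tree(G, s)
--         for e in ends:
--             if visited[e]:
--                 u = e
--                 while u != -1:
--                     if u not in seen:
--                         seen.add(u)
--                         result.append(u)
--                     u = parent[u]
--     return result
-- ===== Notes on version B (the rewrite author's own statement) =====
-- stated objective: faster
-- what changed: B builds the adjacency lists by grouping indices by start value in a dict in one pass (instead of the nested O(n^2) all-pairs scan), runs the DFS only once per start index instead of once per (start,end) pair (A recomputes the identical DFS tree for every end), and deduplicates the output with a set instead of repeated list membership scans.
import Mathlib
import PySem

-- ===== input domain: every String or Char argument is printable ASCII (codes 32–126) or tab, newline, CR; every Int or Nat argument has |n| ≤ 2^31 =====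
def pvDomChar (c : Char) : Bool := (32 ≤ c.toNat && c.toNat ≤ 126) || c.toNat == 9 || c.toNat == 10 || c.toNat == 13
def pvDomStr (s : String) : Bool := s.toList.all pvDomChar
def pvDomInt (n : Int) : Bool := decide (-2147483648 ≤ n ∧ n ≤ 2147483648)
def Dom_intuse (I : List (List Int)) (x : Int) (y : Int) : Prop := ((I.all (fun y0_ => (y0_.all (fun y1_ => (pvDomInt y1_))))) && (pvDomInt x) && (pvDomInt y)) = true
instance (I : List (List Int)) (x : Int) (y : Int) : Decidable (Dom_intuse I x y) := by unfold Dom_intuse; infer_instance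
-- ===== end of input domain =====

-- B builds the adjacency lists by grouping indices by start value in a dict (one pass instead of
-- the nested O(n^2) scan), runs the DFS only once per start index instead of once per
-- (start, end) pair, and deduplicates the output with a set instead of list membership.

-- shared indexing helper: I[i][k]; exact whenever i < I.length and k < (I[i]).length (Pre_)
def rowGet (I : List (List Int)) (i k : Nat) : Int := (I.getD i []).getD k 0

-- ===== PORT A =====
-- recursive DFSvisit; fuel only makes the recursion total (depth ≤ n, fuel n+1 never runs out)
def dfsVisitA (G : List (List Nat)) : Nat → Nat → List Bool × List Int → List Bool × List Int
  | 0, _, st => st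
  | fuel+1, u, st =>
    (G.getD u []).foldl
      (fun st v =>
        if st.1.getD v false then st
        else dfsVisitA G fuel v (st.1, st.2.set v (Int.ofNat u)))
      (st.1.set u true, st.2)

-- the 'while e != -1' loop of DFS; fuel only for totality (chain length ≤ n, fuel n+1 enough)
def chainA (parent : List Int) : Nat → Int → List Int → List Int
  | 0, _, acc => acc
  | fuel+1, e, acc =>
    if e = -1 then acc
    else chainA parent fuel (parent.getD e.toNat (-1))
           (if acc.contains e then acc else acc ++ [e])

def DFSA (G : List (List Nat)) (s e : Nat) (intervals : List Int) : List Int :=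
  let st := dfsVisitA G (G.length + 1) s
              (List.replicate G.length false, List.replicate G.length (-1 : Int))
  if st.1.getD e false then chainA st.2 (G.length + 1) (Int.ofNat e) intervals else intervals

def intuse (I : List (List Int)) (x : Int) (y : Int) : List Int :=
  let n := I.length
  let G := (List.range n).map (fun i =>
    (List.range n).foldl (fun acc j =>
      if i ≠ j ∧ rowGet I i 1 = rowGet I j 0 then acc ++ [j] else acc) ([] : List Nat))
  let starts := (List.range n).foldl (fun acc i =>
    if rowGet I i 0 = x then acc ++ [i] else acc) ([] : List Nat)
  let ends := (List.range n).foldl (fun acc i =>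
    if rowGet I i 1 = y then acc ++ [i] else acc) ([] : List Nat)
  starts.foldl (fun acc s => ends.foldl (fun acc e => DFSA G s e acc) acc) []

-- ===== PORT B =====
-- Source B's recursive go; fuel only makes the recursion total (depth ≤ n, fuel n+1 never runs out)
def goB (G : List (List Nat)) : Nat → Nat → List Bool × List Int → List Bool × List Int
  | 0, _, st => st
  | fuel+1, u, st =>
    (G.getD u []).foldl
      (fun st v =>
        if st.1.getD v false then st
        else goB G fuel v (st.1, st.2.set v (Int.ofNat u)))
      (st.1.set u true, st.2)

def dfsTreeB (G : List (List Nat)) (s : Nat) : List Bool × List Int :=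
  goB G (G.length + 1) s (List.replicate G.length false, List.replicate G.length (-1 : Int))

-- Source B's 'while u != -1' loop carrying (seen, result); fuel only for totality
def chainB (parent : List Int) : Nat → Int → PySem.Set Int × List Int → PySem.Set Int × List Int
  | 0, _, st => st
  | fuel+1, u, st =>
    if u = -1 then st
    else chainB parent fuel (parent.getD u.toNat (-1))
           (if PySem.Set.contains st.1 u then st else (PySem.Set.add st.1 u, st.2 ++ [u]))

def intuse_alt (I : List (List Int)) (x : Int) (y : Int) : List Int :=
  let n := I.length
  let byStart := (List.range n).foldl
    (fun d j => PySem.Dict.modify d (rowGet I j 0) ([] : List Nat) (fun l => l ++ [j]))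
    (PySem.Dict.empty : PySem.Dict Int (List Nat))
  let G := (List.range n).map (fun i =>
    (PySem.Dict.getD byStart (rowGet I i 1) []).filter (fun j => j ≠ i))
  let starts := (List.range n).filter (fun i => rowGet I i 0 = x)
  let ends := (List.range n).filter (fun i => rowGet I i 1 = y)
  (starts.foldl (fun st s =>
      let vp := dfsTreeB G s
      ends.foldl (fun st e =>
        if vp.1.getD e false then chainB vp.2 (G.length + 1) (Int.ofNat e) st else st) st)
    (((PySem.Set.empty : PySem.Set Int), ([] : List Int)))).2

-- ===== PRECONDITION & SPEC =====
-- Pre_: every interval has at least two components; on a shorter row Python A raises IndexError.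
def Pre_intuse (I : List (List Int)) (x : Int) (y : Int) : Prop := ∀ r ∈ I, 2 ≤ r.length
instance (I : List (List Int)) (x : Int) (y : Int) : Decidable (Pre_intuse I x y) := by unfold Pre_intuse; infer_instance
def pvWitness_intuse : List (List Int) × Int × Int := ([[1, 2], [2, 3], [3, 4]], 1, 4)

def Spec_intuse (I : List (List Int)) (x : Int) (y : Int) (out : List Int) : Prop := out = intuse_alt I x y
instance (I : List (List Int)) (x : Int) (y : Int) (out : List Int) : Decidable (Spec_intuse I x y out) := by unfold Spec_intuse; infer_instance

-- ===== CLAIM (what is proved, stated in full; the proofs are below) =====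
def Claim_equal_intuse : Prop := ∀ (I : List (List Int)) (x : Int) (y : Int), Dom_intuse I x y → Pre_intuse I x y → Spec_intuse I x y (intuse I x y)

-- ===== LEMMAS AND PROOFS =====

theorem goB_eq_dfsVisitA (G : List (List Nat)) :
    ∀ (fuel u : Nat) (st : List Bool × List Int), goB G fuel u st = dfsVisitA G fuel u st := by
  intro fuel
  induction fuel with
  | zero => intro u st; rfl
  | succ f ih =>
    intro u st
    simp only [goB, dfsVisitA]
    congr 1
    funext st v
    simp only [ih]

-- grouping a list of indices by key into a dict: each bucket is a filter of the list
theorem group_getD (key : Nat → Int) :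
    ∀ (js : List Nat) (d : PySem.Dict Int (List Nat)) (v : Int),
      PySem.Dict.getD (js.foldl (fun d j => PySem.Dict.modify d (key j) ([] : List Nat) (fun l => l ++ [j])) d) v []
        = PySem.Dict.getD d v [] ++ js.filter (fun j => decide (key j = v)) := by
  intro js
  induction js with
  | nil => intro d v; simp
  | cons j js ih =>
    intro d v
    simp only [List.foldl_cons, List.filter_cons, ih]
    rw [PySem.Dict.getD_modify]
    by_cases h : v = key j
    · simp [h]
    · have h' : ¬ (key j = v) := fun hh => h hh.symm
      simp [h, h']

-- B's while-loop with (seen, result) computes the same result list as A's while-loop,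
-- provided seen and result have the same members (and that is preserved)
theorem chainB_eq (parent : List Int) :
    ∀ (fuel : Nat) (e : Int) (st : PySem.Set Int × List Int),
      (∀ z : Int, z ∈ st.1 ↔ z ∈ st.2) →
      (chainB parent fuel e st).2 = chainA parent fuel e st.2 ∧
      (∀ z : Int, z ∈ (chainB parent fuel e st).1 ↔ z ∈ (chainB parent fuel e st).2) := by
  intro fuel
  induction fuel with
  | zero => intro e st h; exact ⟨rfl, h⟩
  | succ f ih =>
    rintro e ⟨seen, res⟩ h
    by_cases he : e = -1
    · simpa [chainB, chainA, he] using h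
    · have hc : PySem.Set.contains seen e = res.contains e := by
        simp [h e]
      simp only [chainB, chainA, if_neg he, hc]
      by_cases hm : e ∈ res
      · have hres : res.contains e = true := by simp [hm]
        rw [hres]
        simpa using ih _ (seen, res) h
      · have hres : res.contains e = false := by simp [hm]
        have hseen : e ∉ seen := fun hs => hm ((h e).mp hs)
        rw [hres]
        simp only [Bool.false_eq_true, if_false]
        rw [PySem.Set.add_of_not_mem hseen]
        refine ih _ (seen ++ [e], res ++ [e]) ?_
        intro z
        simp [h z]

-- A's per-(start,end) DFS call, with the recomputed traversal named dfsTreeB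
theorem DFSA_eq (G : List (List Nat)) (s e : Nat) (acc : List Int) :
    DFSA G s e acc
      = if (dfsTreeB G s).1.getD e false
          then chainA (dfsTreeB G s).2 (G.length + 1) (Int.ofNat e) acc else acc := by
  simp only [DFSA, dfsTreeB, goB_eq_dfsVisitA]

-- the loop over ends, with a fixed DFS tree vp
theorem inner_fold (G : List (List Nat)) (vp : List Bool × List Int) :
    ∀ (ends : List Nat) (st : PySem.Set Int × List Int),
      (∀ z : Int, z ∈ st.1 ↔ z ∈ st.2) →
      ((ends.foldl (fun st e => if vp.1.getD e false then chainB vp.2 (G.length + 1) (Int.ofNat e) st else st) st).2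
        = ends.foldl (fun acc e => if vp.1.getD e false then chainA vp.2 (G.length + 1) (Int.ofNat e) acc else acc) st.2)
      ∧ (∀ z : Int,
          z ∈ (ends.foldl (fun st e => if vp.1.getD e false then chainB vp.2 (G.length + 1) (Int.ofNat e) st else st) st).1
          ↔ z ∈ (ends.foldl (fun st e => if vp.1.getD e false then chainB vp.2 (G.length + 1) (Int.ofNat e) st else st) st).2) := by
  intro ends
  induction ends with
  | nil => intro st h; exact ⟨rfl, h⟩
  | cons e es ih =>
    intro st h
    simp only [List.foldl_cons]
    by_cases hv : vp.1.getD e false = true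
    · simp only [hv, if_true]
      obtain ⟨h1, h2⟩ := chainB_eq vp.2 (G.length + 1) (Int.ofNat e) st h
      obtain ⟨ih1, ih2⟩ := ih (chainB vp.2 (G.length + 1) (Int.ofNat e) st) h2
      exact ⟨by rw [ih1, h1], ih2⟩
    · simp only [hv]
      exact ih st h

-- the loop over starts
theorem outer_fold (G : List (List Nat)) (ends : List Nat) :
    ∀ (starts : List Nat) (st : PySem.Set Int × List Int),
      (∀ z : Int, z ∈ st.1 ↔ z ∈ st.2) →
      ((starts.foldl (fun st s =>
          ends.foldl (fun st e =>
            if (dfsTreeB G s).1.getD e false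
              then chainB (dfsTreeB G s).2 (G.length + 1) (Int.ofNat e) st else st) st) st).2
        = starts.foldl (fun acc s => ends.foldl (fun acc e =>
            if (dfsTreeB G s).1.getD e false
              then chainA (dfsTreeB G s).2 (G.length + 1) (Int.ofNat e) acc else acc) acc) st.2)
      ∧ (∀ z : Int,
          z ∈ (starts.foldl (fun st s =>
            ends.foldl (fun st e =>
              if (dfsTreeB G s).1.getD e false
                then chainB (dfsTreeB G s).2 (G.length + 1) (Int.ofNat e) st else st) st) st).1
          ↔ z ∈ (starts.foldl (fun st s =>
            ends.foldl (fun st e =>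
              if (dfsTreeB G s).1.getD e false
                then chainB (dfsTreeB G s).2 (G.length + 1) (Int.ofNat e) st else st) st) st).2) := by
  intro starts
  induction starts with
  | nil => intro st h; exact ⟨rfl, h⟩
  | cons s ss ih =>
    intro st h
    simp only [List.foldl_cons]
    obtain ⟨h1, h2⟩ := inner_fold G (dfsTreeB G s) ends st h
    obtain ⟨ih1, ih2⟩ := ih _ h2
    exact ⟨by rw [ih1, h1], ih2⟩

-- the two graph constructions agree
theorem main_eq (I : List (List Int)) (x y : Int) : intuse I x y = intuse_alt I x y := by
  unfold intuse intuse_alt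
  simp only [PySem.List.foldl_append_ite_eq_filter, List.nil_append,
    group_getD (fun j => rowGet I j 0), PySem.Dict.getD_empty, List.filter_filter]
  have hpred : ∀ i : Nat,
      (List.filter (fun j => decide (j ≠ i) && decide (rowGet I j 0 = rowGet I i 1)) (List.range I.length))
        = List.filter (fun j => decide (i ≠ j ∧ rowGet I i 1 = rowGet I j 0)) (List.range I.length) := by
    intro i
    apply List.filter_congr
    intro j _
    rw [← Bool.decide_and, decide_eq_decide]
    constructor <;> rintro ⟨a, b⟩ <;> exact ⟨fun hh => a hh.symm, b.symm⟩
  simp only [hpred, DFSA_eq]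
  exact ((outer_fold _ _ _ ([], []) (by intro z; simp)).1).symm

-- ===== VERDICT (by name: the statement is the Claim_ definition above) =====
theorem intuse_spec : Claim_equal_intuse := by
  intro I x y _ _
  unfold Spec_intuse
  exact main_eq I x y
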